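-- pv_equiv track=rewrite | github.com/Yinwenxu-1212/cloud-computing | test/data_analysis/free_slots_analysis.py | analyze_site_distribution
-- ===== SOURCE A (Python) =====
-- from collections import defaultdict, Counter
--
-- def analyze_site_distribution(free_slots_dic):
--     """分析站点的免费时间段分布"""
--     site_free_counts = defaultdict(int)
--     site_time_slots = defaultdict(list)
--
--     for time_slot, sites in free_slots_dic.items():
--         for site in sites:
--             site_free_counts[site] += 1
--             site_time_slots[site].append(time_slot)
--
--     return dict(site_free_counts), dict(site_time_slots)
-- ===== SOURCE B (Python) =====
-- def analyze_site_distribution(free_slots_dic):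
--     """分析站点的免费时间段分布"""
--     items = list(free_slots_dic.items())
--     site_order = []
--     for _, sites in items:
--         for site in sites:
--             if site not in site_order:
--                 site_order.append(site)
--     site_time_slots = {
--         site: [t for t, sites in items for s in sites if s == site]
--         for site in site_order
--     }
--     site_free_counts = {site: len(slots) for site, slots in site_time_slots.items()}
--     return site_free_counts, site_time_slots
-- ===== Notes on version B (the rewrite author's own statement) =====
-- stated objective: alternative
-- what changed: B replaces A's single inverted pass with two stages: it first collects the sites in first-seen order, then builds each site's slot list by a full per-site scan of the dict (and the counts as those lists' lengths), trading A's incremental dict inversion for a per-site brute-force scan.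
import Mathlib
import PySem

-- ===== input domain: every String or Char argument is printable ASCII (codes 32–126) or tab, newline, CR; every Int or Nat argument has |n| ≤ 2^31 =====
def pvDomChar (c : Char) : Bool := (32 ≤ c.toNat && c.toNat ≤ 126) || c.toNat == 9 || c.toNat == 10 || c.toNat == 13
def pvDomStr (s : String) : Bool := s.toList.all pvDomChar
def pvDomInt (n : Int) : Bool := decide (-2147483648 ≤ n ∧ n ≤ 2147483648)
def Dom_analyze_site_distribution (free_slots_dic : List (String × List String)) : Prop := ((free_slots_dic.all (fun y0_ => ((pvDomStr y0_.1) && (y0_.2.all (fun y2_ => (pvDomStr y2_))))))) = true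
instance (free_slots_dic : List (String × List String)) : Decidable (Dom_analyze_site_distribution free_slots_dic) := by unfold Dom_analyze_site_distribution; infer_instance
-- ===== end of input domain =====

-- B replaces A's single inverted pass with two stages: first-seen site order, then a
-- per-site scan of the whole dict building each slot list (counts = their lengths).
-- Objective: alternative algorithm (per-site scan instead of incremental inversion).

-- ===== PORT A =====
-- A: two defaultdicts updated in lockstep inside the nested loop.
def analyze_site_distribution (free_slots_dic : List (String × List String)) : (List (String × Int)) × (List (String × List String)) :=
  let st := free_slots_dic.foldl
    (fun (st : PySem.Dict String Int × PySem.Dict String (List String)) p =>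
      p.2.foldl
        (fun st site =>
          (st.1.modify site 0 (· + 1), st.2.modify site [] (· ++ [p.1])))
        st)
    (PySem.Dict.empty, PySem.Dict.empty)
  (st.1.items, st.2.items)

-- ===== PORT B =====
-- [t for t, sites in items for s in sites if s == site]
def pvCollect (l : List (String × List String)) (site : String) : List String :=
  l.flatMap (fun p => p.2.filterMap (fun s => if s == site then some p.1 else none))

-- B: first-seen order of sites, then one full scan per site; counts from lengths.
def analyze_site_distribution_alt (free_slots_dic : List (String × List String)) : (List (String × Int)) × (List (String × List String)) :=
  let site_order := free_slots_dic.foldl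
    (fun (ord : List String) p =>
      p.2.foldl (fun ord site => if site ∈ ord then ord else ord ++ [site]) ord)
    []
  let site_time_slots := site_order.map (fun site => (site, pvCollect free_slots_dic site))
  let site_free_counts := site_time_slots.map (fun p => (p.1, (p.2.length : Int)))
  (site_free_counts, site_time_slots)

-- ===== PRECONDITION & SPEC =====
def Spec_analyze_site_distribution (free_slots_dic : List (String × List String)) (out : (List (String × Int)) × (List (String × List String))) : Prop := out = analyze_site_distribution_alt free_slots_dic
instance (free_slots_dic : List (String × List String)) (out : (List (String × Int)) × (List (String × List String))) : Decidable (Spec_analyze_site_distribution free_slots_dic out) := by unfold Spec_analyze_site_distribution; infer_instance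

-- ===== CLAIM (what is proved, stated in full; the proofs are below) =====
def Claim_equal_analyze_site_distribution : Prop := ∀ (free_slots_dic : List (String × List String)), Dom_analyze_site_distribution free_slots_dic → Spec_analyze_site_distribution free_slots_dic (analyze_site_distribution free_slots_dic)

-- ===== LEMMAS AND PROOFS =====

-- The flattened (site, time_slot) occurrence list.
def pvFlat (l : List (String × List String)) : List (String × String) :=
  l.flatMap (fun p => p.2.map (fun s => (s, p.1)))

-- Invariant relating A's counter dict to A's grouping dict.
def pvInv (c : PySem.Dict String Int) (s : PySem.Dict String (List String)) : Prop :=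
  c.keys = s.keys ∧ s.keys.Nodup ∧ ∀ k, c.getD k 0 = ((s.getD k []).length : Int)

theorem pvInv_step (c : PySem.Dict String Int) (s : PySem.Dict String (List String))
    (site t : String) (h : pvInv c s) :
    pvInv (c.modify site 0 (· + 1)) (s.modify site [] (· ++ [t])) := by
  obtain ⟨hk, hnd, hg⟩ := h
  have hcont : c.contains site = s.contains site := by
    simp [PySem.Dict.contains_eq_decide_mem_keys, hk]
  refine ⟨?_, ?_, ?_⟩
  · rw [PySem.Dict.keys_modify, PySem.Dict.keys_modify]
    by_cases hs : s.contains site = true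
    · rw [PySem.Dict.keys_insert_of_contains _ _ (hcont.trans hs),
        PySem.Dict.keys_insert_of_contains _ _ hs, hk]
    · rw [PySem.Dict.keys_insert_of_not_contains _ _ (by simp [hcont, hs]),
        PySem.Dict.keys_insert_of_not_contains _ _ (by simpa using hs), hk]
  · rw [PySem.Dict.keys_modify]
    by_cases hs : s.contains site = true
    · rwa [PySem.Dict.keys_insert_of_contains _ _ hs]
    · rw [PySem.Dict.keys_insert_of_not_contains _ _ (by simpa using hs)]
      refine List.Nodup.append hnd (List.nodup_singleton _) ?_
      intro a ha hb
      simp at hb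
      subst hb
      exact hs (by simpa [PySem.Dict.contains_eq_decide_mem_keys] using ha)
  · intro k
    rw [PySem.Dict.getD_modify, PySem.Dict.getD_modify]
    by_cases hks : k = site <;> simp [hks, hg site, hg k]

theorem pvInv_inner (sites : List String) (t : String)
    (c : PySem.Dict String Int) (s : PySem.Dict String (List String)) (h : pvInv c s) :
    pvInv (sites.foldl (fun st site => (st.1.modify site 0 (· + 1), st.2.modify site [] (· ++ [t]))) (c, s)).1
          (sites.foldl (fun d site => d.modify site [] (· ++ [t])) s) ∧
    (sites.foldl (fun st site => (st.1.modify site 0 (· + 1), st.2.modify site [] (· ++ [t]))) (c, s)).2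
      = sites.foldl (fun d site => d.modify site [] (· ++ [t])) s := by
  induction sites generalizing c s with
  | nil => exact ⟨h, rfl⟩
  | cons a l ih => exact ih _ _ (pvInv_step c s a t h)

theorem pvInv_outer (l : List (String × List String))
    (c : PySem.Dict String Int) (s : PySem.Dict String (List String)) (h : pvInv c s) :
    pvInv (l.foldl (fun st p => p.2.foldl (fun st site => (st.1.modify site 0 (· + 1), st.2.modify site [] (· ++ [p.1]))) st) (c, s)).1
          (l.foldl (fun d p => p.2.foldl (fun d site => d.modify site [] (· ++ [p.1])) d) s) ∧
    (l.foldl (fun st p => p.2.foldl (fun st site => (st.1.modify site 0 (· + 1), st.2.modify site [] (· ++ [p.1]))) st) (c, s)).2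
      = l.foldl (fun d p => p.2.foldl (fun d site => d.modify site [] (· ++ [p.1])) d) s := by
  induction l generalizing c s with
  | nil => exact ⟨h, rfl⟩
  | cons p l ih =>
    obtain ⟨h1, h2⟩ := pvInv_inner p.2 p.1 c s h
    have := ih (p.2.foldl (fun st site => (st.1.modify site 0 (· + 1), st.2.modify site [] (· ++ [p.1]))) (c, s)).1
      (p.2.foldl (fun d site => d.modify site [] (· ++ [p.1])) s) h1
    simpa [List.foldl_cons, ← h2, Prod.mk.eta] using this

theorem pvInv_items (c : PySem.Dict String Int) (s : PySem.Dict String (List String))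
    (h : pvInv c s) : c.items = s.items.map (fun p => (p.1, (p.2.length : Int))) := by
  obtain ⟨hk, hnd, hg⟩ := h
  rw [PySem.Dict.items_eq_map_keys c (hk ▸ hnd) 0,
      PySem.Dict.items_eq_map_keys s hnd [], hk, List.map_map]
  exact List.map_congr_left (fun k _ => by simp [hg k])

-- A's nested grouping fold is the fold over the flattened occurrence list.
theorem pvGroup_eq_flat (l : List (String × List String)) (d : PySem.Dict String (List String)) :
    l.foldl (fun d p => p.2.foldl (fun d site => d.modify site [] (· ++ [p.1])) d) d
      = (pvFlat l).foldl (fun d q => d.modify q.1 [] (· ++ [q.2])) d := by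
  induction l generalizing d with
  | nil => rfl
  | cons p l ih =>
    rw [pvFlat, List.flatMap_cons, List.foldl_append, List.foldl_cons, ih, List.foldl_map, pvFlat]

theorem pvAddFold (xs : List String) (ord : List String) :
    xs.foldl (fun ord site => if site ∈ ord then ord else ord ++ [site]) ord
      = PySem.Set.update ord xs := by
  induction xs generalizing ord with
  | nil => rfl
  | cons a as ih =>
    rw [List.foldl_cons, ih, PySem.Set.update_cons, PySem.Set.add_eq_ite]

-- B's order fold is Set.ofList of the flattened sites.
theorem pvOrder_eq_ofList (l : List (String × List String)) (ord : List String) :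
    l.foldl (fun ord p => p.2.foldl (fun ord site => if site ∈ ord then ord else ord ++ [site]) ord) ord
      = PySem.Set.update ord ((pvFlat l).map (·.1)) := by
  induction l generalizing ord with
  | nil => rfl
  | cons p l ih =>
    have h1 : pvFlat (p :: l) = p.2.map (fun s => (s, p.1)) ++ pvFlat l := by
      rw [pvFlat, List.flatMap_cons]; rfl
    rw [List.foldl_cons, ih, h1, List.map_append, PySem.Set.update_append]
    congr 1
    have h2 : (p.2.map (fun s => (s, p.1))).map (fun x => x.1) = p.2 := by simp [Function.comp_def]
    rw [h2, pvAddFold]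

theorem pvFilterMapFilter (as : List String) (t site : String) :
    as.filterMap (fun s => if s == site then some t else none)
      = ((as.map (fun s => (s, t))).filter (fun q => q.1 == site)).map (fun x => x.2) := by
  induction as with
  | nil => rfl
  | cons a as ih =>
    simp only [List.filterMap_cons, List.map_cons, List.filter_cons]
    by_cases h : a = site <;> simp [h] <;> simpa using ih


-- B's collected slots are the filtered flattened list.
theorem pvCollect_eq_flat (l : List (String × List String)) (site : String) :
    pvCollect l site = (((pvFlat l).filter (fun q => q.1 == site)).map (·.2)) := by
  induction l with
  | nil => rfl
  | cons p l ih =>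
    rw [pvCollect, List.flatMap_cons, pvFlat, List.flatMap_cons, List.filter_append,
      List.map_append, ← pvFlat, ← pvCollect, ih]
    rw [pvFilterMapFilter p.2 p.1 site]

-- ===== VERDICT (by name: the statement is the Claim_ definition above) =====
theorem analyze_site_distribution_spec : Claim_equal_analyze_site_distribution := by
  intro l _
  unfold Spec_analyze_site_distribution analyze_site_distribution analyze_site_distribution_alt
  have hinv : pvInv PySem.Dict.empty (PySem.Dict.empty : PySem.Dict String (List String)) := by
    refine ⟨rfl, by simp [PySem.Dict.keys_empty], fun k => by simp⟩
  obtain ⟨h1, h2⟩ := pvInv_outer l PySem.Dict.empty PySem.Dict.empty hinv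
  dsimp only
  rw [pvInv_items _ _ (h2 ▸ h1), h2, pvGroup_eq_flat]
  have hitems : ((pvFlat l).foldl (fun d q => d.modify q.1 [] (· ++ [q.2])) (PySem.Dict.empty : PySem.Dict String (List String))).items
      = (l.foldl (fun ord p => p.2.foldl (fun ord site => if site ∈ ord then ord else ord ++ [site]) ord) []).map
          (fun site => (site, pvCollect l site)) := by
    rw [pvOrder_eq_ofList, PySem.Set.update_nil_left,
      PySem.Dict.items_eq_map_keys _ ?hnd [],
      PySem.Dict.keys_foldl_modify_key, PySem.Dict.keys_empty, PySem.Set.update_nil_left]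
    case hnd =>
      exact PySem.Dict.nodup_keys_foldl_modify_key _ _ _ _ _ (by simp)
    refine List.map_congr_left fun k _ => ?_
    rw [PySem.Dict.getD_foldl_modify_append, pvCollect_eq_flat]
    simp
  rw [hitems]
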